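-- pv_equiv track=rewrite | github.com/chointer/CodingProblems | 프로그래머스/lv3/64062. 징검다리 건너기/징검다리 건너기.py | check
-- ===== SOURCE A (Python) =====
-- def check(stones, k, n):
--     count = 0
--     for stone in stones:
--         if stone >= n:
--             count = 0
--         else:
--             count += 1
--             if count >= k:
--                 return False
--     return True
-- ===== SOURCE B (Python) =====
-- def _run_length(rest, below, n):
--     run = 0
--     for t in rest:
--         if (t < n) != below:
--             break
--         run += 1
--     return run
--
-- def check(stones, k, n):
--     rest = stones
--     while rest:
--         below = rest[0] < n
--         run = _run_length(rest, below, n)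
--         if below and run >= k:
--             return False
--         rest = rest[run:]
--     return True
-- ===== Notes on version B (the rewrite author's own statement) =====
-- stated objective: alternative
-- what changed: B traverses the list run by run (maximal groups of same (stone < n) key, a groupby-style scan) and compares each below-run's length against k, instead of A's per-element counter with reset and early exit.
import Mathlib
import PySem

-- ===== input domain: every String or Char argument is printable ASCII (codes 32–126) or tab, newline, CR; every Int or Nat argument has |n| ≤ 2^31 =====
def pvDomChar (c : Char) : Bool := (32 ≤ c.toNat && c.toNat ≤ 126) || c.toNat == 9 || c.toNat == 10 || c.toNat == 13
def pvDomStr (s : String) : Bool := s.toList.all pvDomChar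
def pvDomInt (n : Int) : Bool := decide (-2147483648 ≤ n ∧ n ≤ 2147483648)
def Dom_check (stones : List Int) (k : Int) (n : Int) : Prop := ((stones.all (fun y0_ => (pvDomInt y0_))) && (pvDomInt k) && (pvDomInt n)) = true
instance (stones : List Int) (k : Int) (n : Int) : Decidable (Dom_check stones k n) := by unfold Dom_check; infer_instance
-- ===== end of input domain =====

-- B replaces A's per-element reset counter by a run-by-run (groupby-style) scan; objective: alternative decomposition, same cost.

-- ===== PORT A =====
-- A's for-loop with the running 'count' and early 'return False', as structural recursion.
def checkGoA (k n : Int) : List Int → Int → Bool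
  | [], _ => true
  | stone :: rest, count =>
    if stone ≥ n then checkGoA k n rest 0
    else
      if count + 1 ≥ k then false
      else checkGoA k n rest (count + 1)

def check (stones : List Int) (k : Int) (n : Int) : Bool := checkGoA k n stones 0

-- ===== PORT B =====
-- Source B's _run_length: length of the maximal prefix whose (t < n) equals 'below'.
def runLength (n : Int) (below : Bool) : List Int → Nat
  | [] => 0
  | t :: ts => if (decide (t < n)) ≠ below then 0 else runLength n below ts + 1

theorem runLength_head_pos (n : Int) (s : Int) (ts : List Int) :
    1 ≤ runLength n (decide (s < n)) (s :: ts) := by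
  simp [runLength]

-- Source B's outer while-loop over runs.
def checkGoB (k n : Int) (rest : List Int) : Bool :=
  match rest with
  | [] => true
  | s :: ts =>
    let below := decide (s < n)
    let run := runLength n below (s :: ts)
    if below && decide ((run : Int) ≥ k) then false
    else checkGoB k n ((s :: ts).drop run)
termination_by rest.length
decreasing_by
  have h1 := runLength_head_pos n s ts
  simp [List.length_drop]
  omega

def check_alt (stones : List Int) (k : Int) (n : Int) : Bool := checkGoB k n stones

-- ===== PRECONDITION & SPEC =====
def Spec_check (stones : List Int) (k : Int) (n : Int) (out : Bool) : Prop := out = check_alt stones k n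
instance (stones : List Int) (k : Int) (n : Int) (out : Bool) : Decidable (Spec_check stones k n out) := by unfold Spec_check; infer_instance

-- ===== CLAIM (what is proved, stated in full; the proofs are below) =====
def Claim_equal_check : Prop := ∀ (stones : List Int) (k : Int) (n : Int), Dom_check stones k n → Spec_check stones k n (check stones k n)

-- ===== LEMMAS AND PROOFS =====

-- Every element of the run prefix has (t < n) = below.
theorem runLength_take (n : Int) (below : Bool) :
    ∀ xs : List Int, ∀ t ∈ xs.take (runLength n below xs), decide (t < n) = below := by
  intro xs
  induction xs with
  | nil => simp
  | cons x ys ih =>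
    by_cases h : decide (x < n) = below
    · intro t ht
      simp [runLength, h] at ht
      rcases ht with h1 | h2
      · simpa [h1] using h
      · exact ih t h2
    · intro t ht
      simp [runLength, h] at ht
  
-- After the run, the list is empty or starts with an element of the other key.
theorem runLength_drop (n : Int) (below : Bool) :
    ∀ xs : List Int, xs.drop (runLength n below xs) = [] ∨
      ∃ h tl, xs.drop (runLength n below xs) = h :: tl ∧ decide (h < n) ≠ below := by
  intro xs
  induction xs with
  | nil => simp
  | cons x ys ih =>
    by_cases h : decide (x < n) = below
    · simpa [runLength, h] using ih
    · right; exact ⟨x, ys, by simp [runLength, h], h⟩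

theorem runLength_le_length (n : Int) (below : Bool) :
    ∀ xs : List Int, runLength n below xs ≤ xs.length := by
  intro xs
  induction xs with
  | nil => simp [runLength]
  | cons x ys ih =>
    by_cases h : decide (x < n) = below
    · simp [runLength, h]
      omega
    · simp [runLength, h]

-- L1: over a run of below-stones, A fails iff the run pushes the counter to k, else the counter grows by the run's length.
theorem goA_below_run (k n : Int) :
    ∀ (grp rest : List Int) (c : Int), (∀ t ∈ grp, t < n) →
      checkGoA k n (grp ++ rest) c =
        if grp ≠ [] ∧ c + (grp.length : Int) ≥ k then false
        else checkGoA k n rest (c + (grp.length : Int)) := by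
  intro grp
  induction grp with
  | nil => intro rest c _; simp
  | cons s g ih =>
    intro rest c hall
    have hs : s < n := hall s (by simp)
    have hg : ∀ t ∈ g, t < n := fun t ht => hall t (List.mem_cons_of_mem _ ht)
    have hstep : checkGoA k n ((s :: g) ++ rest) c =
        if c + 1 ≥ k then false else checkGoA k n (g ++ rest) (c + 1) := by
      rw [List.cons_append]
      show (if s ≥ n then _ else _) = _
      rw [if_neg (not_le.mpr hs)]
    have hlen : c + (((s :: g).length : Nat) : Int) = (c + 1) + (g.length : Int) := by
      simp only [List.length_cons]; push_cast; ring
    by_cases hk : c + 1 ≥ k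
    · rw [hstep, if_pos hk,
        if_pos ⟨by simp, by simp only [List.length_cons]; push_cast; omega⟩]
    · rw [hstep, if_neg hk, ih rest (c + 1) hg]
      by_cases hgnil : g = []
      · subst hgnil
        rw [if_neg (fun h => h.1 rfl)]
        rw [if_neg (by simp only [List.length_cons, List.length_nil]; push_cast; omega)]
        norm_num
      · by_cases hbig : (c + 1) + (g.length : Int) ≥ k
        · rw [if_pos ⟨hgnil, hbig⟩,
            if_pos ⟨by simp, by simp only [List.length_cons]; push_cast; omega⟩]
        · rw [if_neg (fun h => hbig h.2)]
          rw [if_neg (by simp only [List.length_cons]; push_cast; omega)]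
          rw [hlen]

-- L2: a nonempty run of stones ≥ n resets the counter.
theorem goA_reset_run (k n : Int) :
    ∀ (grp rest : List Int) (c : Int), grp ≠ [] → (∀ t ∈ grp, ¬ t < n) →
      checkGoA k n (grp ++ rest) c = checkGoA k n rest 0 := by
  intro grp
  induction grp with
  | nil => intro _ _ h; exact absurd rfl h
  | cons s g ih =>
    intro rest c _ hall
    have hs : s ≥ n := not_lt.mp (hall s (by simp))
    rw [List.cons_append, show checkGoA k n (s :: (g ++ rest)) c
          = checkGoA k n (g ++ rest) 0 by simp [checkGoA, hs]]
    by_cases hg : g = []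
    · subst hg; simp
    · exact ih rest 0 hg (fun t ht => hall t (by simp [ht]))

-- At a stone ≥ n (or the end of the list), the counter's value is irrelevant.
theorem goA_count_irrelevant (k n : Int) (rest : List Int) (c : Int)
    (h : rest = [] ∨ ∃ r tl, rest = r :: tl ∧ ¬ r < n) :
    checkGoA k n rest c = checkGoA k n rest 0 := by
  rcases h with h | ⟨r, tl, rfl, hr⟩
  · subst h; rfl
  · simp [checkGoA, not_lt.mp hr]

-- Main induction, on the length of the remaining list, following B's run recursion.
theorem goA_eq_goB (k n : Int) :
    ∀ (m : Nat) (rest : List Int), rest.length ≤ m →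
      checkGoA k n rest 0 = checkGoB k n rest := by
  intro m
  induction m with
  | zero =>
    intro rest h
    have : rest = [] := List.length_eq_zero_iff.mp (Nat.le_zero.mp h)
    subst this
    simp [checkGoA, checkGoB]
  | succ m ih =>
    intro rest hlen
    match rest with
    | [] => simp [checkGoA, checkGoB]
    | s :: ts =>
      set below := decide (s < n) with hb
      set run := runLength n below (s :: ts) with hr
      have hrun1 : 1 ≤ run := runLength_head_pos n s ts
      have hrunle : run ≤ (s :: ts).length := runLength_le_length n below (s :: ts)
      have hsplit : (s :: ts).take run ++ (s :: ts).drop run = s :: ts :=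
        List.take_append_drop run (s :: ts)
      have htlen : ((s :: ts).take run).length = run := by
        rw [List.length_take]
        omega
      have hdlen : ((s :: ts).drop run).length ≤ m := by
        rw [List.length_drop]
        simp only [List.length_cons] at hlen ⊢
        omega
      have hdrop := runLength_drop n below (s :: ts)
      have hB : checkGoB k n (s :: ts) =
          if below && decide ((run : Int) ≥ k) then false
          else checkGoB k n ((s :: ts).drop run) := by
        rw [checkGoB]
      cases hbv : below with
      | true =>
        have hall : ∀ t ∈ (s :: ts).take run, t < n := by
          intro t ht
          have := runLength_take n below (s :: ts) t ht
          rw [hbv] at this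
          exact of_decide_eq_true this
        have hne : (s :: ts).take run ≠ [] := by
          intro hnil
          rw [hnil] at htlen
          simp at htlen
          omega
        have hA : checkGoA k n (s :: ts) 0 =
            if (s :: ts).take run ≠ [] ∧ (0 : Int) + (((s :: ts).take run).length : Int) ≥ k
            then false else checkGoA k n ((s :: ts).drop run) ((0 : Int) + (((s :: ts).take run).length : Int)) := by
          conv_lhs => rw [← hsplit]
          exact goA_below_run k n _ _ 0 hall
        rw [hA, hB, hbv, htlen]
        by_cases hk : ((run : Int) ≥ k)
        · rw [if_pos ⟨hne, by omega⟩, if_pos (by simp [hk])]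
        · rw [if_neg (by rintro ⟨-, h2⟩; omega), if_neg (by simp [hk])]
          have hdrop' : (s :: ts).drop run = [] ∨
              ∃ r tl, (s :: ts).drop run = r :: tl ∧ ¬ r < n := by
            rcases hdrop with h | ⟨h0, tl, heq, hne2⟩
            · exact Or.inl h
            · right
              refine ⟨h0, tl, heq, ?_⟩
              rw [hbv] at hne2
              intro hlt
              exact hne2 (by simpa using hlt)
          rw [goA_count_irrelevant k n _ _ hdrop']
          exact ih _ hdlen
      | false =>
        have hall : ∀ t ∈ (s :: ts).take run, ¬ t < n := by
          intro t ht
          have := runLength_take n below (s :: ts) t ht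
          rw [hbv] at this
          simpa using this
        have hne : (s :: ts).take run ≠ [] := by
          intro hnil
          rw [hnil] at htlen
          simp at htlen
          omega
        have hA : checkGoA k n (s :: ts) 0 = checkGoA k n ((s :: ts).drop run) 0 := by
          conv_lhs => rw [← hsplit]
          exact goA_reset_run k n _ _ 0 hne hall
        rw [hA, hB, hbv, if_neg (by simp)]
        exact ih _ hdlen

-- ===== VERDICT (by name: the statement is the Claim_ definition above) =====
theorem check_spec : Claim_equal_check := by
  intro stones k n _
  unfold Spec_check check check_alt
  exact goA_eq_goB k n stones.length stones le_rfl
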